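-- pv_equiv track=rewrite | github.com/Aaron349899401/myprograms | ccc/ccc_lsi_challenge.py | robo_revisit
-- ===== SOURCE A (Python) =====
-- def robo_revisit(directions):
--     if not directions:
--         return True
--     visited = set()
--     x = 0
--     y = 0
--     visited.add((x, y))
--     for direction in directions:
--         if direction == "N":
--             y += 1
--         elif direction == "S":
--             y -= 1
--         elif direction == "E":
--             x += 1
--         elif direction == "W":
--             x -= 1
--         if (x, y) in visited:
--             return True
--         visited.add((x, y))
--     return False
-- ===== SOURCE B (Python) =====
-- _DELTAS = {"N": (0, 1), "S": (0, -1), "E": (1, 0), "W": (-1, 0)}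
--
-- def robo_revisit(directions):
--     # A position is revisited iff some nonempty contiguous run of moves
--     # has zero net displacement. Check every segment by brute force.
--     if not directions:
--         return True
--     deltas = [_DELTAS.get(d, (0, 0)) for d in directions]
--     n = len(deltas)
--     for i in range(n):
--         dx = 0
--         dy = 0
--         for j in range(i, n):
--             dx += deltas[j][0]
--             dy += deltas[j][1]
--             if dx == 0 and dy == 0:
--                 return True
--     return False
-- ===== Notes on version B (the rewrite author's own statement) =====
-- stated objective: alternative
-- what changed: B drops the visited-set simulation entirely: it maps moves to displacement vectors and returns True iff some nonempty contiguous segment of moves has zero net displacement, checked by a nested segment scan.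
import Mathlib
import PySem

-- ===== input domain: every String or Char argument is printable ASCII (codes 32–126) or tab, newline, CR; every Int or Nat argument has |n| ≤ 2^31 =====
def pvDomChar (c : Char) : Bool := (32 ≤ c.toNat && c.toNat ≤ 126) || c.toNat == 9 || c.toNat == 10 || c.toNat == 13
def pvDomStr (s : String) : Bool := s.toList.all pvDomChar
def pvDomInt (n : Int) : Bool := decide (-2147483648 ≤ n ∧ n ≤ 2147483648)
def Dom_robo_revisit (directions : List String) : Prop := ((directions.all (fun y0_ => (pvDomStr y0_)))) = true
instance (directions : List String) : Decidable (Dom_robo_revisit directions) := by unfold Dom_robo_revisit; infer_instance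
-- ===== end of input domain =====

-- B abandons the visited-set simulation: it maps moves to displacement vectors and
-- answers True iff some nonempty contiguous segment of moves has zero net displacement
-- (alternative algorithm; O(n^2) segment scan instead of A's O(n) set simulation).

-- ===== PORT A =====
-- one step of A's if/elif chain, applied to the current (x, y)
def roboStepA (d : String) (x y : Int) : Int × Int :=
  if d == "N" then (x, y + 1)
  else if d == "S" then (x, y - 1)
  else if d == "E" then (x + 1, y)
  else if d == "W" then (x - 1, y)
  else (x, y)

-- A's for-loop with early return: state = visited set and current x, y
def roboLoopA : List String → PySem.Set (Int × Int) → Int → Int → Bool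
  | [], _, _, _ => false
  | d :: ds, visited, x, y =>
    let xy := roboStepA d x y
    if PySem.Set.contains visited xy then true
    else roboLoopA ds (PySem.Set.add visited xy) xy.1 xy.2

def robo_revisit (directions : List String) : Bool :=
  if directions = [] then true
  else roboLoopA directions (PySem.Set.add PySem.Set.empty ((0 : Int), (0 : Int))) 0 0

-- ===== PORT B =====
-- B's _DELTAS.get(d, (0, 0)) lookup
def roboDelta (d : String) : Int × Int :=
  if d == "N" then (0, 1)
  else if d == "S" then (0, -1)
  else if d == "E" then (1, 0)
  else if d == "W" then (-1, 0)
  else (0, 0)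

-- B's inner loop: running (dx, dy) over the segment starting at the current suffix
def roboInner : List (Int × Int) → Int → Int → Bool
  | [], _, _ => false
  | q :: qs, dx, dy =>
    let dx' := dx + q.1
    let dy' := dy + q.2
    if dx' = 0 ∧ dy' = 0 then true else roboInner qs dx' dy'

-- B's outer loop: one inner scan per starting index i (= per suffix of deltas)
def roboOuter : List (Int × Int) → Bool
  | [] => false
  | q :: qs => if roboInner (q :: qs) 0 0 then true else roboOuter qs

def robo_revisit_alt (directions : List String) : Bool :=
  if directions = [] then true
  else roboOuter (directions.map roboDelta)

-- ===== PRECONDITION & SPEC =====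
def Spec_robo_revisit (directions : List String) (out : Bool) : Prop := out = robo_revisit_alt directions
instance (directions : List String) (out : Bool) : Decidable (Spec_robo_revisit directions out) := by unfold Spec_robo_revisit; infer_instance

-- ===== CLAIM (what is proved, stated in full; the proofs are below) =====
def Claim_equal_robo_revisit : Prop := ∀ (directions : List String), Dom_robo_revisit directions → Spec_robo_revisit directions (robo_revisit directions)

-- ===== LEMMAS AND PROOFS =====

-- the positions visited after each step of A (proof helper)
def posA : List String → Int × Int → List (Int × Int)
  | [], _ => []
  | d :: ds, p => let p' := roboStepA d p.1 p.2; p' :: posA ds p'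

theorem roboStep_delta (d : String) (x y : Int) :
    roboStepA d x y = ((x, y) : Int × Int) + roboDelta d := by
  simp only [roboStepA, roboDelta]
  split_ifs <;> simp [Prod.ext_iff, sub_eq_add_neg]

-- A's loop returns True exactly when visited ++ remaining positions has a duplicate
theorem roboLoopA_eq (ds : List String) : ∀ (v : PySem.Set (Int × Int)) (x y : Int),
    v.Nodup → (roboLoopA ds v x y = true ↔ ¬ (v ++ posA ds (x, y)).Nodup) := by
  induction ds with
  | nil => intro v x y hv; simp [roboLoopA, posA, hv]
  | cons d ds ih =>
    intro v x y hv
    rw [roboLoopA, posA]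
    set p := roboStepA d x y with hp
    by_cases hc : PySem.Set.contains v p = true
    · have hmem : p ∈ v := (PySem.Set.contains_iff _ _).mp hc
      simp only [hc, if_true, true_iff]
      intro hnd
      rcases List.nodup_append.mp hnd with ⟨_, _, hdisj⟩
      exact hdisj p hmem p (List.mem_cons_self ..) rfl
    · have hmem : p ∉ v := fun h => hc ((PySem.Set.contains_iff _ _).mpr h)
      have hadd : PySem.Set.add v p = v ++ [p] := by rw [PySem.Set.add, if_neg hc]
      have hnd' : (v ++ [p]).Nodup := by
        rw [List.nodup_append]
        refine ⟨hv, List.nodup_singleton _, ?_⟩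
        intro a ha b hb
        rw [List.mem_singleton] at hb
        subst hb
        exact fun hE => hmem (hE ▸ ha)
      rw [if_neg hc, hadd]
      have := ih (v ++ [p]) p.1 p.2 hnd'
      simpa [List.append_assoc] using this

-- the position list is the list of prefix sums of the displacement vectors
theorem posA_get? (ds : List String) : ∀ (p : Int × Int) (i : Nat), i ≤ ds.length →
    (p :: posA ds p)[i]? = some (p + ((ds.map roboDelta).take i).sum) := by
  induction ds with
  | nil =>
    intro p i hi
    have : i = 0 := Nat.le_zero.mp hi
    subst this
    simp
  | cons d ds ih =>
    intro p i hi
    match i with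
    | 0 => simp
    | j + 1 =>
      simp only [posA]
      have hstep : roboStepA d p.1 p.2 = p + roboDelta d := roboStep_delta d p.1 p.2
      have := ih (p + roboDelta d) j (by simpa using Nat.lt_succ_iff.mp (Nat.lt_of_succ_le (by simpa using hi)))
      calc (p :: roboStepA d p.1 p.2 :: posA ds (roboStepA d p.1 p.2))[j + 1]?
          = ((p + roboDelta d) :: posA ds (p + roboDelta d))[j]? := by rw [hstep]; rfl
        _ = some (p + ((roboDelta d :: ds.map roboDelta).take (j + 1)).sum) := by
            rw [this]; simp [add_assoc]
        _ = some (p + (((d :: ds).map roboDelta).take (j + 1)).sum) := by simp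

-- B's inner loop finds a nonempty prefix of l cancelling the accumulated (dx, dy)
theorem roboInner_iff (l : List (Int × Int)) : ∀ (dx dy : Int),
    roboInner l dx dy = true ↔ ∃ k, 1 ≤ k ∧ k ≤ l.length ∧ ((dx, dy) : Int × Int) + (l.take k).sum = 0 := by
  induction l with
  | nil =>
    intro dx dy
    simp only [roboInner]
    constructor
    · intro h; cases h
    · rintro ⟨k, hk1, hk2, _⟩; simp at hk2; omega
  | cons q qs ih =>
    intro dx dy
    simp only [roboInner]
    by_cases h0 : dx + q.1 = 0 ∧ dy + q.2 = 0
    · rw [if_pos h0]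
      constructor
      · intro _
        exact ⟨1, le_refl 1, by simp, by simp [Prod.ext_iff, h0.1, h0.2]⟩
      · intro _; rfl
    · rw [if_neg h0, ih]
      constructor
      · rintro ⟨k, hk1, hk2, hsum⟩
        refine ⟨k + 1, by omega, ?_, ?_⟩
        · simp only [List.length_cons]; omega
        · simp only [List.take_succ_cons, List.sum_cons, ← add_assoc] at *
          simpa [Prod.ext_iff, add_assoc] using hsum
      · rintro ⟨k, hk1, hk2, hsum⟩
        have hk2' : k ≤ qs.length + 1 := by simpa using hk2
        match k, hk1 with
        | 1, _ =>
          exfalso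
          apply h0
          simpa [Prod.ext_iff] using hsum
        | j + 2, _ =>
          refine ⟨j + 1, by omega, by omega, ?_⟩
          simp only [List.take_succ_cons, List.sum_cons, ← add_assoc] at hsum
          simpa [Prod.ext_iff, add_assoc] using hsum

-- B's outer loop finds a nonempty zero-sum contiguous segment
theorem roboOuter_iff (l : List (Int × Int)) :
    roboOuter l = true ↔ ∃ i k, 1 ≤ k ∧ i + k ≤ l.length ∧ (((l.drop i).take k).sum : Int × Int) = 0 := by
  induction l with
  | nil =>
    simp only [roboOuter]
    constructor
    · intro h; cases h
    · rintro ⟨i, k, hk, hik, _⟩; simp at hik; omega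
  | cons q qs ih =>
    simp only [roboOuter]
    by_cases hin : roboInner (q :: qs) 0 0 = true
    · rw [if_pos hin]
      rcases (roboInner_iff (q :: qs) 0 0).mp hin with ⟨k, hk1, hk2, hsum⟩
      constructor
      · intro _
        refine ⟨0, k, hk1, by simpa using hk2, ?_⟩
        simpa [Prod.mk_zero_zero] using hsum
      · intro _; rfl
    · rw [if_neg hin, ih]
      constructor
      · rintro ⟨i, k, hk1, hik, hsum⟩
        refine ⟨i + 1, k, hk1, ?_, by simpa using hsum⟩
        simp only [List.length_cons]; omega
      · rintro ⟨i, k, hk1, hik, hsum⟩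
        have hik' : i + k ≤ qs.length + 1 := by simpa using hik
        match i with
        | 0 =>
          exfalso
          apply hin
          apply (roboInner_iff (q :: qs) 0 0).mpr
          refine ⟨k, hk1, by simpa using hik, ?_⟩
          simpa [Prod.mk_zero_zero] using hsum
        | j + 1 =>
          exact ⟨j, k, hk1, by omega, by simpa using hsum⟩

theorem posA_length (ds : List String) : ∀ p, (posA ds p).length = ds.length := by
  induction ds with
  | nil => intro p; simp [posA]
  | cons d ds ih => intro p; simp [posA, ih]

-- equal prefix sums at i < j ↔ the segment between them sums to zero
theorem segment_zero_iff (L : List (Int × Int)) (i j : Nat) (hij : i < j) (hj : j ≤ L.length) :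
    (L.take i).sum = (L.take j).sum ↔ (((L.drop i).take (j - i)).sum : Int × Int) = 0 := by
  have hsplit : L.take j = L.take i ++ (L.drop i).take (j - i) := by
    conv_lhs => rw [show j = i + (j - i) by omega, List.take_add]
  rw [hsplit, List.sum_append]
  constructor
  · intro hEq
    have h2 := congrArg (fun z => -((L.take i).sum) + z) hEq
    simpa using h2.symm
  · intro hEq; rw [hEq, add_zero]

-- ===== VERDICT (by name: the statement is the Claim_ definition above) =====
theorem robo_revisit_spec : Claim_equal_robo_revisit := by
  intro directions _
  unfold Spec_robo_revisit robo_revisit robo_revisit_alt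
  by_cases h : directions = []
  · simp [h]
  · rw [if_neg h, if_neg h]
    have hadd : PySem.Set.add PySem.Set.empty ((0 : Int), (0 : Int)) = [((0 : Int), (0 : Int))] := by
      rw [PySem.Set.add]; simp [PySem.Set.empty, PySem.Set.contains]
    rw [hadd]
    set L := directions.map roboDelta with hL
    have hlen : L.length = directions.length := by simp [hL]
    have hloop := roboLoopA_eq directions [((0 : Int), (0 : Int))] 0 0 (List.nodup_singleton _)
    rw [Bool.eq_iff_iff, hloop, roboOuter_iff]
    have hP : ∀ i ≤ directions.length,
        (((0, 0) : Int × Int) :: posA directions (0, 0))[i]? = some ((L.take i).sum) := by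
      intro i hi
      rw [posA_get? directions (0, 0) i hi]
      simp [← hL, Prod.mk_zero_zero]
    have hPlen : (((0, 0) : Int × Int) :: posA directions (0, 0)).length = directions.length + 1 := by
      simp [posA_length]
    rw [List.singleton_append]
    constructor
    · intro hnd
      rw [List.nodup_iff_getElem?_ne_getElem?] at hnd
      push_neg at hnd
      rcases hnd with ⟨i, j, hij, hj, heq⟩
      rw [hPlen] at hj
      have hj' : j ≤ directions.length := by omega
      have hi' : i ≤ directions.length := by omega
      rw [hP i hi', hP j hj'] at heq
      have hsum : (L.take i).sum = (L.take j).sum := by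
        exact Option.some.inj heq
      refine ⟨i, j - i, by omega, by omega, ?_⟩
      exact (segment_zero_iff L i j hij (hlen ▸ hj')).mp hsum
    · rintro ⟨i, k, hk, hik, hseg⟩
      rw [hlen] at hik
      rw [List.nodup_iff_getElem?_ne_getElem?]
      push_neg
      refine ⟨i, i + k, by omega, by omega, ?_⟩
      rw [hP i (by omega), hP (i + k) (by omega)]
      have hsum : (L.take i).sum = (L.take (i + k)).sum := by
        apply (segment_zero_iff L i (i + k) (by omega) (by omega)).mpr
        simpa using hseg
      rw [hsum]
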